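-- pv_equiv track=rewrite | github.com/DCodeBase-X/fleet-ops-analytics | dashboard/app.py | status_colors_for_util
-- ===== SOURCE A (Python) =====
-- def status_colors_for_util(pct_series):
--     result = []
--     for v in pct_series:
--         if v >= 80:
--             result.append("#059669")
--         elif v >= 60:
--             result.append("#D97706")
--         else:
--             result.append("#DC2626")
--     return result
-- ===== SOURCE B (Python) =====
-- def status_colors_for_util(pct_series):
--     # Staged overwrite passes: start all red, then paint orange over >=60, then green over >=80.
--     result = ["#DC2626"] * len(pct_series)
--     result = ["#D97706" if v >= 60 else c for v, c in zip(pct_series, result)]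
--     result = ["#059669" if v >= 80 else c for v, c in zip(pct_series, result)]
--     return result
-- ===== Notes on version B (the rewrite author's own statement) =====
-- stated objective: alternative
-- what changed: Replaced A's single pass with an if/elif ladder by three staged passes: initialize the whole list red, then an overwrite pass painting orange where v >= 60, then an overwrite pass painting green where v >= 80.
import Mathlib
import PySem

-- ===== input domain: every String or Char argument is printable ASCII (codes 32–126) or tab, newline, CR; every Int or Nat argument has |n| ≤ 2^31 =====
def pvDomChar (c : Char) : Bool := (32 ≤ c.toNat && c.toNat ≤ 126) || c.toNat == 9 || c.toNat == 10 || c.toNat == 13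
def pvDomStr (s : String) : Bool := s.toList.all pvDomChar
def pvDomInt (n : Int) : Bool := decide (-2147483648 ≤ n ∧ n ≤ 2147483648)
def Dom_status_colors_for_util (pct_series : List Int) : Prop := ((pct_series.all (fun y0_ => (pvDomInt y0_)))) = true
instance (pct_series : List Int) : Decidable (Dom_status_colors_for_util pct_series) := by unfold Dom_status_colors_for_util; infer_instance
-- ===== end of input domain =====

-- B replaces A's one-pass if/elif ladder by three staged passes: an all-red list, an orange
-- overwrite pass for v >= 60, and a green overwrite pass for v >= 80 (alternative decomposition).

-- ===== PORT A =====
def status_colors_for_util (pct_series : List Int) : List String :=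
  pct_series.foldl (fun result v =>
    if v ≥ 80 then result ++ ["#059669"]
    else if v ≥ 60 then result ++ ["#D97706"]
    else result ++ ["#DC2626"]) []

-- ===== PORT B =====
def status_colors_for_util_alt (pct_series : List Int) : List String :=
  let result0 := List.replicate pct_series.length "#DC2626"
  let result1 := List.zipWith (fun v c => if v ≥ 60 then "#D97706" else c) pct_series result0
  let result2 := List.zipWith (fun v c => if v ≥ 80 then "#059669" else c) pct_series result1
  result2

-- ===== PRECONDITION & SPEC =====
def Spec_status_colors_for_util (pct_series : List Int) (out : List String) : Prop := out = status_colors_for_util_alt pct_series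
instance (pct_series : List Int) (out : List String) : Decidable (Spec_status_colors_for_util pct_series out) := by unfold Spec_status_colors_for_util; infer_instance

-- ===== CLAIM (what is proved, stated in full; the proofs are below) =====
def Claim_equal_status_colors_for_util : Prop := ∀ (pct_series : List Int), Dom_status_colors_for_util pct_series → Spec_status_colors_for_util pct_series (status_colors_for_util pct_series)

-- ===== LEMMAS AND PROOFS =====
def pvStep (v : Int) : String :=
  if v ≥ 80 then "#059669" else if v ≥ 60 then "#D97706" else "#DC2626"

theorem pvFoldl_acc (xs : List Int) (acc : List String) :
    xs.foldl (fun result v =>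
      if v ≥ 80 then result ++ ["#059669"]
      else if v ≥ 60 then result ++ ["#D97706"]
      else result ++ ["#DC2626"]) acc = acc ++ xs.map pvStep := by
  induction xs generalizing acc with
  | nil => simp
  | cons x xs ih =>
    simp only [List.foldl, List.map]
    rw [ih]
    unfold pvStep
    split_ifs <;> simp

theorem pvAlt_eq_map (xs : List Int) :
    status_colors_for_util_alt xs = xs.map pvStep := by
  induction xs with
  | nil => rfl
  | cons x xs ih =>
    simp only [status_colors_for_util_alt, List.length_cons, List.replicate_succ,
      List.zipWith_cons_cons, List.map] at ih ⊢
    rw [ih]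
    unfold pvStep
    split_ifs <;> simp_all

-- ===== VERDICT (by name: the statement is the Claim_ definition above) =====
theorem status_colors_for_util_spec : Claim_equal_status_colors_for_util := by
  intro xs _
  unfold Spec_status_colors_for_util status_colors_for_util
  rw [pvFoldl_acc, pvAlt_eq_map]
  simp
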